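-- pv_equiv track=rewrite | github.com/cu-swe4s-fall-2019/hash-tables-qyang13 | hash_functions.py | h_sedgwicks
-- ===== SOURCE A (Python) =====
-- def h_sedgwicks(key, N):
--     '''
--     A hash function mentioned in Robert Sedgwicks's Algorithm in C. Optimized
--     to speed up the process
--     '''
--     b = 378551
--     a = 63689
--     s = 0
--     for i in range(len(key)):
--         s = s * a + ord(key[i])
--         a = a * b
--     return s % N
-- ===== SOURCE B (Python) =====
-- def h_sedgwicks(key, N):
--     b = 378551
--     # the multiplier schedule A applies: a_j = 63689 * b**j for position j
--     avals = []
--     a = 63689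
--     for _ in key:
--         avals.append(a)
--         a = a * b
--     # reverse pass: each character contributes ord(c) times the product of the
--     # multipliers of all later positions
--     total = 0
--     w = 1
--     for ch, av in zip(reversed(key), reversed(avals)):
--         total += ord(ch) * w
--         w *= av
--     return total % N
-- ===== Notes on version B (the rewrite author's own statement) =====
-- stated objective: alternative
-- what changed: Replaces A's forward Horner recurrence (rescaling the accumulator by a growing multiplier each step) with a reverse weighted-sum pass that adds each character's contribution ord(c)*w under an explicit positional weight w built from the same multiplier schedule.
import Mathlib
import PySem

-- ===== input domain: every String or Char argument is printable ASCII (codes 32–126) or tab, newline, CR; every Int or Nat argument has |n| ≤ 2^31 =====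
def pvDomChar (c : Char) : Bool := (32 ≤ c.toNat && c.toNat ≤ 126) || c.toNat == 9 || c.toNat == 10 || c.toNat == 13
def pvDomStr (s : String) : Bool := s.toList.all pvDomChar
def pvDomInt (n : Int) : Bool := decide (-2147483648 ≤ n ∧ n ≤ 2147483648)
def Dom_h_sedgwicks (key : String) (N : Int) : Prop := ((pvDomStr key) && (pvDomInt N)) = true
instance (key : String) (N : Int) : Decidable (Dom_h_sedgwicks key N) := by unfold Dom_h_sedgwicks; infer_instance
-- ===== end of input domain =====

-- B replaces A's forward Horner recurrence with a reverse weighted-sum pass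
-- over an explicit multiplier schedule (alternative decomposition, same cost).


-- ===== PORT A =====
-- loop 'for i in range(len(key)): s = s*a + ord(key[i]); a = a*b'
def hsLoopA : List Char → Int → Int → Int
  | [], s, _ => s
  | c :: t, s, a => hsLoopA t (s * a + (c.toNat : Int)) (a * 378551)

def h_sedgwicks (key : String) (N : Int) : Int :=
  PySem.Int.mod (hsLoopA key.toList 0 63689) N

-- ===== PORT B =====
-- loop building avals: 'for _ in key: avals.append(a); a = a*b'
def hsAvals : List Char → Int → List Int
  | [], _ => []
  | _ :: t, a => a :: hsAvals t (a * 378551)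

-- loop 'for ch, av in zip(reversed(key), reversed(avals)): total += ord(ch)*w; w *= av'
def hsLoopB (ps : List (Char × Int)) (tw : Int × Int) : Int × Int :=
  ps.foldl (fun tw p => (tw.1 + (p.1.toNat : Int) * tw.2, tw.2 * p.2)) tw

def h_sedgwicks_alt (key : String) (N : Int) : Int :=
  let avals := hsAvals key.toList 63689
  let tw := hsLoopB (List.zip key.toList.reverse avals.reverse) (0, 1)
  PySem.Int.mod tw.1 N

-- ===== PRECONDITION & SPEC =====
-- Python raises ZeroDivisionError on '% N' when N = 0
def Pre_h_sedgwicks (key : String) (N : Int) : Prop := N ≠ 0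
instance (key : String) (N : Int) : Decidable (Pre_h_sedgwicks key N) := by unfold Pre_h_sedgwicks; infer_instance
def pvWitness_h_sedgwicks : String × Int := ("abc", 97)

def Spec_h_sedgwicks (key : String) (N : Int) (out : Int) : Prop := out = h_sedgwicks_alt key N
instance (key : String) (N : Int) (out : Int) : Decidable (Spec_h_sedgwicks key N out) := by unfold Spec_h_sedgwicks; infer_instance

-- ===== CLAIM (what is proved, stated in full; the proofs are below) =====
def Claim_equal_h_sedgwicks : Prop := ∀ (key : String) (N : Int), Dom_h_sedgwicks key N → Pre_h_sedgwicks key N → Spec_h_sedgwicks key N (h_sedgwicks key N)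

-- ===== LEMMAS AND PROOFS =====

lemma hsAvals_length (l : List Char) (a : Int) : (hsAvals l a).length = l.length := by
  induction l generalizing a with
  | nil => rfl
  | cons c t ih => simp [hsAvals, ih]

-- core invariant: A's Horner fold equals s times the final weight plus B's total
lemma hsLoop_eq (l : List Char) (s a : Int) :
    hsLoopA l s a =
      s * (hsLoopB (List.zip l.reverse (hsAvals l a).reverse) (0, 1)).2
        + (hsLoopB (List.zip l.reverse (hsAvals l a).reverse) (0, 1)).1 := by
  induction l generalizing s a with
  | nil => simp [hsLoopA, hsLoopB]
  | cons c t ih =>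
    have hlen : t.reverse.length = (hsAvals t (a * 378551)).reverse.length := by
      simp [hsAvals_length]
    have hz : List.zip (c :: t).reverse (hsAvals (c :: t) a).reverse
        = List.zip t.reverse (hsAvals t (a * 378551)).reverse ++ [(c, a)] := by
      simp [hsAvals, List.zip_append hlen]
    rw [hsLoopA, ih, hz]
    unfold hsLoopB
    rw [List.foldl_append]
    simp only [List.foldl]
    ring

-- ===== VERDICT (by name: the statement is the Claim_ definition above) =====
theorem h_sedgwicks_spec : Claim_equal_h_sedgwicks := by
  intro key N _ _
  unfold Spec_h_sedgwicks h_sedgwicks h_sedgwicks_alt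
  simp only
  rw [hsLoop_eq key.toList 0 63689]
  ring_nf
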